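-- pv_equiv track=rewrite | github.com/min1907/python_learning | DSA/Codility_Triangle.py | solution
-- ===== SOURCE A (Python) =====
-- from itertools import combinations
--
-- def solution(A):
--     combi_obj = combinations(A, 3)
--     result = [
--         x
--         for x in list(combi_obj)
--         if (x[0] + x[1]) > x[2] and (x[0] + x[2]) > x[1] and (x[1] + x[2]) > x[0]
--     ]
--     if len(result) > 0:
--         return 1
--     return 0
-- ===== SOURCE B (Python) =====
-- def solution(A):
--     s = sorted(A)
--     if any(x + y > z for x, y, z in zip(s, s[1:], s[2:])):
--         return 1
--     return 0
-- ===== Notes on version B (the rewrite author's own statement) =====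
-- stated objective: faster
-- what changed: Replaced the enumeration of all 3-element combinations by sorting the array once and scanning consecutive triples, using the fact that a triangular triplet exists iff some three consecutive sorted values form one.
import Mathlib
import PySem

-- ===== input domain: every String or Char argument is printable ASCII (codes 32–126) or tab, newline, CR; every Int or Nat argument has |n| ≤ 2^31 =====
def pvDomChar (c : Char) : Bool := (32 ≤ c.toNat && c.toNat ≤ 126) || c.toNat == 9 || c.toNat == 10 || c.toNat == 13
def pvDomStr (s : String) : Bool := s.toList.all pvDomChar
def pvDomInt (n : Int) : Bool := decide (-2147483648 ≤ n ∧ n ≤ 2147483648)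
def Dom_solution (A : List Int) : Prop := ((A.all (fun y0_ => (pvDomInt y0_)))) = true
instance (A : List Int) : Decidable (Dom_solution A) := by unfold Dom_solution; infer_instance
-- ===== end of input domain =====

-- B replaces A's O(n^3) scan of all 3-combinations by sort-then-scan of consecutive triples (O(n log n)).

-- ===== PORT A =====
-- itertools.combinations(A, 2) / (A, 3): lexicographic-by-index combinations
def combos2 : List Int → List (Int × Int)
  | [] => []
  | x :: xs => xs.map (fun y => (x, y)) ++ combos2 xs

def combos3 : List Int → List (Int × Int × Int)
  | [] => []
  | x :: xs => (combos2 xs).map (fun p => (x, p.1, p.2)) ++ combos3 xs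

def triPred (t : Int × Int × Int) : Bool :=
  decide (t.1 + t.2.1 > t.2.2) && decide (t.1 + t.2.2 > t.2.1) && decide (t.2.1 + t.2.2 > t.1)

def solution (A : List Int) : Int :=
  let result := (combos3 A).filter triPred
  if result.length > 0 then 1 else 0

-- ===== PORT B =====
-- any(x + y > z for x, y, z in zip(s, s[1:], s[2:]))
def win : List Int → Bool
  | a :: b :: c :: t => decide (a + b > c) || win (b :: c :: t)
  | _ => false

def solution_alt (A : List Int) : Int :=
  if win (PySem.List.sorted A (fun x => x) false) then 1 else 0

-- ===== PRECONDITION & SPEC =====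
def Spec_solution (A : List Int) (out : Int) : Prop := out = solution_alt A
instance (A : List Int) (out : Int) : Decidable (Spec_solution A out) := by unfold Spec_solution; infer_instance

-- ===== CLAIM (what is proved, stated in full; the proofs are below) =====
def Claim_equal_solution : Prop := ∀ (A : List Int), Dom_solution A → Spec_solution A (solution A)

-- ===== LEMMAS AND PROOFS =====

-- the symmetric triangle condition
def tri (x y z : Int) : Prop := x + y > z ∧ x + z > y ∧ y + z > x

theorem mem_combos2 (a b : Int) (l : List Int) :
    (a, b) ∈ combos2 l ↔ List.Sublist [a, b] l := by
  induction l with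
  | nil => simp [combos2]
  | cons x xs ih =>
    simp only [combos2, List.mem_append, List.mem_map, List.sublist_cons_iff]
    constructor
    · rintro (⟨y, hy, heq⟩ | h)
      · injection heq with h1 h2
        subst h1; subst h2
        exact Or.inr ⟨[y], rfl, by simpa using hy⟩
      · exact Or.inl (ih.mp h)
    · rintro (h | ⟨r, hr, hsub⟩)
      · exact Or.inr (ih.mpr h)
      · cases hr
        exact Or.inl ⟨b, by simpa using hsub, rfl⟩

theorem mem_combos3 (a b c : Int) (l : List Int) :
    (a, b, c) ∈ combos3 l ↔ List.Sublist [a, b, c] l := by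
  induction l with
  | nil => simp [combos3]
  | cons x xs ih =>
    simp only [combos3, List.mem_append, List.mem_map, List.sublist_cons_iff]
    constructor
    · rintro (⟨p, hp, heq⟩ | h)
      · obtain ⟨p1, p2⟩ := p
        injection heq with h1 h2
        injection h2 with h3 h4
        subst h1; subst h3; subst h4
        exact Or.inr ⟨[p1, p2], rfl, (mem_combos2 _ _ _).mp hp⟩
      · exact Or.inl (ih.mp h)
    · rintro (h | ⟨r, hr, hsub⟩)
      · exact Or.inr (ih.mpr h)
      · cases hr
        exact Or.inl ⟨(b, c), (mem_combos2 _ _ _).mpr hsub, rfl⟩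

theorem solution_one_iff (A : List Int) :
    solution A = 1 ↔ ∃ x y z, List.Sublist [x, y, z] A ∧ tri x y z := by
  unfold solution
  constructor
  · intro h
    by_cases hlen : ((combos3 A).filter triPred).length > 0
    · obtain ⟨t, ht⟩ := List.exists_mem_of_length_pos hlen
      have hmem := List.mem_filter.mp ht
      obtain ⟨⟨x, y, z⟩, rfl⟩ : ∃ p : Int × Int × Int, p = t := ⟨t, rfl⟩
      refine ⟨x, y, z, (mem_combos3 _ _ _ _).mp hmem.1, ?_⟩
      have := hmem.2
      simp only [triPred, Bool.and_eq_true, decide_eq_true_eq] at this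
      exact ⟨this.1.1, this.1.2, this.2⟩
    · simp [hlen] at h
  · rintro ⟨x, y, z, hsub, ht⟩
    have hmem : (x, y, z) ∈ (combos3 A).filter triPred := by
      refine List.mem_filter.mpr ⟨(mem_combos3 _ _ _ _).mpr hsub, ?_⟩
      simp only [triPred, Bool.and_eq_true, decide_eq_true_eq]
      exact ⟨⟨ht.1, ht.2.1⟩, ht.2.2⟩
    have : ((combos3 A).filter triPred).length > 0 := List.length_pos_of_mem hmem
    simp [this]

theorem win_cons (a : Int) (t : List Int) (h : win t = true) : win (a :: t) = true := by
  match t with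
  | [] => simp [win] at h
  | [b] => simp [win] at h
  | b :: c :: t' => simp [win, h]

-- W3: r sits somewhere after q in a sorted list, p + q > r ⇒ a consecutive window fires
theorem win_of_mem (t : List Int) : ∀ p q r : Int, (p :: q :: t).Pairwise (· ≤ ·) →
    r ∈ t → p + q > r → win (p :: q :: t) = true := by
  induction t with
  | nil => intro p q r _ h; simp at h
  | cons c rest ih =>
    intro p q r hpw hr hgt
    rcases List.mem_cons.mp hr with rfl | hr
    · simp [win, hgt]
    · have hpw' : (q :: c :: rest).Pairwise (· ≤ ·) :=
        hpw.sublist (by simp) |>.sublist (List.Sublist.refl _) |> (fun h => h)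
      have hpc : p ≤ c := by
        have := List.pairwise_cons.mp hpw
        exact this.1 c (by simp)
      have : win (q :: c :: rest) = true := by
        refine ih q c r ?_ hr (by omega)
        exact hpw.sublist (List.sublist_cons_self _ _)
      exact win_cons p _ this

-- W2: [q, r] a sublist of the tail, p + q > r ⇒ a window fires
theorem win_of_sublist2 (t : List Int) : ∀ p q r : Int, (p :: t).Pairwise (· ≤ ·) →
    List.Sublist [q, r] t → p + q > r → win (p :: t) = true := by
  induction t with
  | nil => intro p q r _ h; simp at h
  | cons b rest ih =>
    intro p q r hpw hsub hgt
    rcases List.sublist_cons_iff.mp hsub with h | ⟨r', hr', hsub'⟩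
    · have hpb : p ≤ b := (List.pairwise_cons.mp hpw).1 b (by simp)
      have : win (b :: rest) = true := by
        refine ih b q r (hpw.sublist (List.sublist_cons_self _ _)) h (by omega)
      exact win_cons p _ this
    · cases hr'
      exact win_of_mem rest p b r hpw (by simpa using hsub') hgt

-- W1: any sorted list containing a triangular sublist has a firing window
theorem win_of_sublist3 (s : List Int) : ∀ p q r : Int, s.Pairwise (· ≤ ·) →
    List.Sublist [p, q, r] s → p + q > r → win s = true := by
  induction s with
  | nil => intro p q r _ h; simp at h
  | cons a t ih =>
    intro p q r hpw hsub hgt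
    rcases List.sublist_cons_iff.mp hsub with h | ⟨r', hr', hsub'⟩
    · exact win_cons a t (ih p q r (hpw.sublist (List.sublist_cons_self _ _)) h hgt)
    · cases hr'
      exact win_of_sublist2 t a q r hpw hsub' hgt

-- extraction: a firing window of a sorted list yields a triangular sublist
theorem win_extract (s : List Int) (hpw : s.Pairwise (· ≤ ·)) (h : win s = true) :
    ∃ p q r, List.Sublist [p, q, r] s ∧ tri p q r := by
  induction s with
  | nil => simp [win] at h
  | cons a t ih =>
    match t, h with
    | [], h => simp [win] at h
    | [b], h => simp [win] at h
    | b :: c :: t', h =>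
      simp only [win, Bool.or_eq_true, decide_eq_true_eq] at h
      rcases h with h | h
      · refine ⟨a, b, c, ?_, ?_⟩
        · exact (List.cons_sublist_cons.mpr (List.cons_sublist_cons.mpr
            (List.cons_sublist_cons.mpr (List.nil_sublist _))))
        · have hab : a ≤ b := (List.pairwise_cons.mp hpw).1 b (by simp)
          have hbc : b ≤ c := (List.pairwise_cons.mp (hpw.sublist (List.sublist_cons_self _ _))).1 c (by simp)
          exact ⟨h, by omega, by omega⟩
      · obtain ⟨p, q, r, hsub, ht⟩ := ih (hpw.sublist (List.sublist_cons_self _ _)) h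
        exact ⟨p, q, r, hsub.cons a, ht⟩

-- transport of the triangle property along a permutation of a 3-element list
theorem tri_of_perm (l : List Int) (x y z : Int) (hperm : l.Perm [x, y, z])
    (ht : tri x y z) : ∃ p q r, l = [p, q, r] ∧ tri p q r := by
  have hlen : l.length = 3 := by simpa using hperm.length_eq
  obtain ⟨p, q, r, rfl⟩ : ∃ p q r, l = [p, q, r] := by
    match l, hlen with
    | [p, q, r], _ => exact ⟨p, q, r, rfl⟩
  refine ⟨p, q, r, rfl, ?_⟩
  have hsum : p + q + r = x + y + z := by
    have := hperm.sum_eq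
    simp at this
    omega
  have hp : p = x ∨ p = y ∨ p = z := by simpa using hperm.mem_iff.mp (by simp : p ∈ [p, q, r])
  have hq : q = x ∨ q = y ∨ q = z := by simpa using hperm.mem_iff.mp (by simp : q ∈ [p, q, r])
  have hr : r = x ∨ r = y ∨ r = z := by simpa using hperm.mem_iff.mp (by simp : r ∈ [p, q, r])
  obtain ⟨h1, h2, h3⟩ := ht
  unfold tri
  rcases hp with rfl | rfl | rfl <;> rcases hq with rfl | rfl | rfl <;>
    rcases hr with rfl | rfl | rfl <;> omega

theorem exists_tri_iff_win (A : List Int) :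
    (∃ x y z, List.Sublist [x, y, z] A ∧ tri x y z) ↔
      win (PySem.List.sorted A (fun x => x) false) = true := by
  have hperm : (PySem.List.sorted A (fun x => x) false).Perm A :=
    PySem.List.sorted_perm A (fun x => x) false
  have hpw : (PySem.List.sorted A (fun x => x) false).Pairwise (· ≤ ·) := by
    simpa using PySem.List.sorted_pairwise A (fun x => x)
  constructor
  · rintro ⟨x, y, z, hsub, ht⟩
    have hsp : List.Subperm [x, y, z] (PySem.List.sorted A (fun x => x) false) :=
      List.Subperm.trans hsub.subperm hperm.symm.subperm
    obtain ⟨l, hlp, hls⟩ := hsp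
    obtain ⟨p, q, r, rfl, htp⟩ := tri_of_perm l x y z hlp ht
    have hpq : p ≤ q := (List.pairwise_cons.mp (hpw.sublist hls)).1 q (by simp)
    exact win_of_sublist3 _ p q r hpw hls htp.1
  · intro h
    obtain ⟨p, q, r, hsub, ht⟩ := win_extract _ hpw h
    have hsp : List.Subperm [p, q, r] A :=
      List.Subperm.trans hsub.subperm hperm.subperm
    obtain ⟨l, hlp, hls⟩ := hsp
    obtain ⟨x, y, z, rfl, htx⟩ := tri_of_perm l p q r hlp ht
    exact ⟨x, y, z, hls, htx⟩

-- ===== VERDICT (by name: the statement is the Claim_ definition above) =====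
theorem solution_spec : Claim_equal_solution := by
  intro A _
  unfold Spec_solution solution_alt
  by_cases hw : win (PySem.List.sorted A (fun x => x) false) = true
  · rw [if_pos hw]
    exact (solution_one_iff A).mpr ((exists_tri_iff_win A).mpr hw)
  · rw [if_neg hw]
    unfold solution
    by_cases hlen : ((combos3 A).filter triPred).length > 0
    · exfalso
      apply hw
      apply (exists_tri_iff_win A).mp
      apply (solution_one_iff A).mp
      simp [solution, hlen]
    · simp [hlen]
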